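-- pv_equiv track=rewrite | github.com/taham8875/problem-solving | B 716 - Complete the word/main.py | isNiceWord
-- ===== SOURCE A (Python) =====
-- def isNiceWord(word):
--     if len(word) < 26:
--         return False  # Not enough characters to form a nice substring.
--
--     for i in range(len(word) - 25):
--         substring = word[i : i + 26]
--
--         if len(substring) == len(set(substring)):
--             return True # Every character is unique.
--     return False
-- ===== SOURCE B (Python) =====
-- def isNiceWord(word):
--     # Single-pass sliding window: track the leftmost start of an all-distinct
--     # window ending at the current index via a last-seen-index dict.
--     last = {}
--     left = 0
--     for right, ch in enumerate(word):
--         prev = last.get(ch)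
--         if prev is not None and prev >= left:
--             left = prev + 1
--         last[ch] = right
--         if right - left + 1 >= 26:
--             return True
--     return False
-- ===== Notes on version B (the rewrite author's own statement) =====
-- stated objective: faster
-- what changed: Replaced the per-position rebuild of a 26-character set over every window with a single-pass sliding window keeping a last-seen-index dict and a left boundary, returning True as soon as a distinct window of length 26 appears.
import Mathlib
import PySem

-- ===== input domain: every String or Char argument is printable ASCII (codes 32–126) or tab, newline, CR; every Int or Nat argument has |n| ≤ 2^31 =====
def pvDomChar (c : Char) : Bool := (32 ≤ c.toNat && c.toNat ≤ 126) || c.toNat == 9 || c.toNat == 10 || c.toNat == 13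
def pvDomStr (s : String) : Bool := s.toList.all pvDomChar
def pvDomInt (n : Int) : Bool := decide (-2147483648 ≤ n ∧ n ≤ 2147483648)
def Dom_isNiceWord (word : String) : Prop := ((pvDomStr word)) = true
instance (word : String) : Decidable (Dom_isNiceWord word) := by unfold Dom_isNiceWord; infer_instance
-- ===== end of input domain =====

-- B replaces A's per-start rebuild of a set over every 26-character window by a single
-- sliding-window pass (last-seen-index dict + left boundary); same Bool result, proved equal.

-- ===== PORT A =====
def isNiceWordLoop (word : String) : List Int → Bool
  | [] => false
  | i :: rest =>
      let substring := PySem.Str.slice word (some i) (some (i + 26))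
      if PySem.Str.len substring == PySem.Set.len (PySem.Set.ofList substring.toList) then true
      else isNiceWordLoop word rest

def isNiceWord (word : String) : Bool :=
  if PySem.Str.len word < 26 then false
  else isNiceWordLoop word (PySem.List.pyRange 0 (PySem.Str.len word - 25) 1)

-- ===== PORT B =====
def isNiceWordAltLoop : List (Int × Char) → Int → PySem.Dict Char Int → Bool
  | [], _, _ => false
  | (right, ch) :: rest, left, last =>
      let left' : Int :=
        match PySem.Dict.get? last ch with
        | some prev => if left ≤ prev then prev + 1 else left
        | none => left
      let last' := PySem.Dict.insert last ch right
      if 26 ≤ right - left' + 1 then true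
      else isNiceWordAltLoop rest left' last'

def isNiceWord_alt (word : String) : Bool :=
  isNiceWordAltLoop (PySem.List.enumerate word.toList 0) 0 PySem.Dict.empty

-- ===== PRECONDITION & SPEC =====
def Spec_isNiceWord (word : String) (out : Bool) : Prop := out = isNiceWord_alt word
instance (word : String) (out : Bool) : Decidable (Spec_isNiceWord word out) := by unfold Spec_isNiceWord; infer_instance

-- ===== CLAIM (what is proved, stated in full; the proofs are below) =====
def Claim_equal_isNiceWord : Prop := ∀ (word : String), Dom_isNiceWord word → Spec_isNiceWord word (isNiceWord word)

-- ===== LEMMAS AND PROOFS =====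

/-- `Good cs`: some 26-character window of `cs` has pairwise-distinct characters;
the common specification both loops are proved equivalent to. -/
def Good (cs : List Char) : Prop :=
  ∃ i : Nat, i + 26 ≤ cs.length ∧ ((cs.drop i).take 26).Nodup

def lastIdx (cs : List Char) : Nat → Char → Option Nat
  | 0, _ => none
  | r+1, c => if cs[r]? = some c then some r else lastIdx cs r c

lemma lastIdx_none_spec {cs : List Char} {r : Nat} {c : Char}
    (h : lastIdx cs r c = none) : ∀ j, j < r → cs[j]? ≠ some c := by
  induction r with
  | zero => intro j hj; omega
  | succ r ih =>
    intro j hj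
    simp only [lastIdx] at h
    split at h
    · exact absurd h (by simp)
    · rcases Nat.lt_succ_iff_lt_or_eq.1 hj with h' | h'
      · exact ih h j h'
      · subst h'; assumption

lemma lastIdx_some_spec {cs : List Char} {c : Char} :
    ∀ {r p : Nat}, lastIdx cs r c = some p →
    p < r ∧ cs[p]? = some c ∧ ∀ j, p < j → j < r → cs[j]? ≠ some c := by
  intro r
  induction r with
  | zero => intro p h; simp [lastIdx] at h
  | succ r ih =>
    intro p h
    simp only [lastIdx] at h
    split at h
    · rename_i hc
      obtain rfl : r = p := by injection h
      exact ⟨Nat.lt_succ_self r, hc, by intro j h1 h2; omega⟩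
    · rename_i hc
      obtain ⟨h1, h2, h3⟩ := ih h
      refine ⟨by omega, h2, ?_⟩
      intro j hj1 hj2
      rcases Nat.lt_succ_iff_lt_or_eq.1 hj2 with h' | h'
      · exact h3 j hj1 h'
      · subst h'; exact hc

lemma mem_win_iff (cs : List Char) (l r : Nat) (c : Char) :
    c ∈ (cs.take r).drop l ↔ ∃ j, l ≤ j ∧ j < r ∧ cs[j]? = some c := by
  constructor
  · intro hc
    rw [List.mem_iff_getElem?] at hc
    obtain ⟨q, hq⟩ := hc
    rw [List.getElem?_drop, List.getElem?_take] at hq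
    split at hq
    · exact ⟨l + q, by omega, by omega, hq⟩
    · simp at hq
  · rintro ⟨j, h1, h2, h3⟩
    rw [List.mem_iff_getElem?]
    refine ⟨j - l, ?_⟩
    rw [List.getElem?_drop, List.getElem?_take]
    rw [if_pos (by omega), show l + (j - l) = j from by omega]
    exact h3

lemma win_concat (cs : List Char) (l r : Nat) (hr : r < cs.length) (hl : l ≤ r) :
    (cs.take (r+1)).drop l = (cs.take r).drop l ++ [cs[r]] := by
  rw [List.take_add_one, List.getElem?_eq_getElem hr]
  rw [List.drop_append_of_le_length (by simpa using by omega)]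
  rfl

lemma setLen_eq_iff (l : List Char) :
    (PySem.Set.ofList l).length = l.length ↔ l.Nodup := by
  constructor
  · intro h
    have hsub : PySem.Set.ofList l ⊆ l := fun x hx => (PySem.Set.mem_ofList l x).1 hx
    have hperm := ((PySem.Set.nodup_ofList l).subperm hsub).perm_of_length_le (by omega)
    exact hperm.nodup (PySem.Set.nodup_ofList l)
  · intro h
    rw [PySem.Set.ofList_eq_self_of_nodup l h]

lemma loopA_iff (word : String) :
    ∀ (n : Nat) (a b : Int), 0 ≤ a → b - a ≤ n →
    (isNiceWordLoop word (PySem.List.pyRange a b 1) = true ↔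
      ∃ i : Nat, a ≤ (i : Int) ∧ (i : Int) < b ∧ ((word.toList.drop i).take 26).Nodup) := by
  intro n
  induction n with
  | zero =>
    intro a b ha hn
    rw [PySem.List.pyRange_one_eq_nil (by omega)]
    simp only [isNiceWordLoop]
    constructor
    · intro h; cases h
    · rintro ⟨i, h1, h2, _⟩; omega
  | succ n ih =>
    intro a b ha hn
    rcases Int.lt_or_le a b with hba | hba
    case inr =>
      rw [PySem.List.pyRange_one_eq_nil hba]
      simp only [isNiceWordLoop]
      constructor
      · intro h; cases h
      · rintro ⟨i, h1, h2, _⟩; omega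
    case inl =>
      rw [PySem.List.pyRange_one_cons hba]
      simp only [isNiceWordLoop]
      have hsub : (PySem.Str.slice word (some a) (some (a + 26))).toList
          = (word.toList.drop a.toNat).take 26 := by
        rw [PySem.Str.toList_slice, PySem.Chars.slice_eq_listSlice,
            PySem.List.slice_toNat word.toList ha (by omega)]
        congr 1
        omega
      have hcond : (PySem.Str.len (PySem.Str.slice word (some a) (some (a + 26)))
            == PySem.Set.len (PySem.Set.ofList (PySem.Str.slice word (some a) (some (a + 26))).toList))
          = true ↔ ((word.toList.drop a.toNat).take 26).Nodup := by
        rw [beq_iff_eq, PySem.Str.len_eq, hsub]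
        simp only [PySem.Set.len, Nat.cast_inj]
        exact ⟨fun h => (setLen_eq_iff _).1 h.symm, fun h => ((setLen_eq_iff _).2 h).symm⟩
      split
      · rename_i hc
        rw [hcond] at hc
        simp only [true_iff]
        exact ⟨a.toNat, by omega, by omega, hc⟩
      · rename_i hc
        rw [hcond] at hc
        rw [ih (a + 1) b (by omega) (by omega)]
        constructor
        · rintro ⟨i, h1, h2, h3⟩; exact ⟨i, by omega, h2, h3⟩
        · rintro ⟨i, h1, h2, h3⟩
          refine ⟨i, ?_, h2, h3⟩
          rcases Int.lt_or_le a i with h' | h'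
          · omega
          · exfalso; apply hc; rw [show a.toNat = i from by omega]; exact h3

lemma nodup_concat_iff (l : List Char) (c : Char) : (l ++ [c]).Nodup ↔ l.Nodup ∧ c ∉ l := by
  simp [List.nodup_append]
  exact fun _ => ⟨fun h hc => h c hc rfl, fun h a ha he => h (he ▸ ha)⟩

lemma loopB_iff (cs : List Char) :
    ∀ (m r l : Nat) (last : PySem.Dict Char Int),
    cs.length - r ≤ m → r ≤ cs.length → l ≤ r →
    ((cs.take r).drop l).Nodup →
    (∀ l', l' < l → ¬ ((cs.take r).drop l').Nodup) →
    (∀ c, last.get? c = (lastIdx cs r c).map (fun p => (p : Int))) →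
    (isNiceWordAltLoop (PySem.List.enumerate (cs.drop r) (r : Int)) (l : Int) last = true ↔
      ∃ i : Nat, i + 26 ≤ cs.length ∧ r ≤ i + 25 ∧ ((cs.drop i).take 26).Nodup) := by
  intro m
  induction m with
  | zero =>
    intro r l last hm hr hlr H1 H2 H3
    have hre : r = cs.length := by omega
    rw [hre, List.drop_length, PySem.List.enumerate_nil]
    simp only [isNiceWordAltLoop]
    constructor
    · intro h; cases h
    · rintro ⟨i, h1, h2, _⟩; omega
  | succ m ih =>
    intro r l last hm hr hlr H1 H2 H3
    by_cases hre : r = cs.length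
    · rw [hre, List.drop_length, PySem.List.enumerate_nil]
      simp only [isNiceWordAltLoop]
      constructor
      · intro h; cases h
      · rintro ⟨i, h1, h2, _⟩; omega
    · have hrlt : r < cs.length := by omega
      rw [List.drop_eq_getElem_cons hrlt, PySem.List.enumerate_cons]
      simp only [isNiceWordAltLoop]
      rw [H3 cs[r]]
      -- window concatenation: cs[0:r+1][l'':] = cs[0:r][l'':] ++ [cs[r]]
      have hwc : ∀ l'', l'' ≤ r → (cs.take (r+1)).drop l'' = (cs.take r).drop l'' ++ [cs[r]] :=
        fun l'' h => win_concat cs l'' r hrlt h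
      -- updated dict invariant
      have H3' : ∀ c, ((last.insert cs[r] (r : Int)).get? c)
          = (lastIdx cs (r+1) c).map (fun p => (p : Int)) := by
        intro c
        rw [PySem.Dict.get?_insert, H3 c]
        simp only [lastIdx, List.getElem?_eq_getElem hrlt]
        by_cases hc : c = cs[r]
        · subst hc; rw [if_pos rfl, if_pos rfl]; rfl
        · rw [if_neg hc, if_neg (by simpa [eq_comm] using hc)]
      -- the common continuation: given the new left pointer and its invariants
      have hfin : ∀ l' : Nat, l' ≤ r →
          ((cs.take (r+1)).drop l').Nodup →
          (∀ l'', l'' < l' → ¬ ((cs.take (r+1)).drop l'').Nodup) →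
          ((if 26 ≤ (r : Int) - (l' : Int) + 1 then true
            else isNiceWordAltLoop (PySem.List.enumerate (cs.drop (r+1)) ((r : Int) + 1))
              ((l' : Int)) (last.insert cs[r] (r : Int))) = true ↔
            ∃ i : Nat, i + 26 ≤ cs.length ∧ r ≤ i + 25 ∧ ((cs.drop i).take 26).Nodup) := by
        intro l' hl'r H1' H2'
        by_cases hchk : l' + 25 ≤ r
        · rw [if_pos (by omega)]
          simp only [true_iff]
          refine ⟨r - 25, by omega, by omega, ?_⟩
          have e1 : (cs.drop (r-25)).take 26 = (cs.take (r+1)).drop (r-25) := by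
            rw [List.drop_take, show r + 1 - (r - 25) = 26 from by omega]
          rw [e1, show r - 25 = l' + (r - 25 - l') from by omega, ← List.drop_drop]
          exact List.Nodup.sublist (List.drop_sublist _ _) H1'
        · rw [if_neg (by omega), show (r : Int) + 1 = ((r + 1 : Nat) : Int) from by push_cast; ring]
          rw [ih (r+1) l' (last.insert cs[r] (r : Int)) (by omega) (by omega) (by omega) H1' H2' H3']
          constructor
          · rintro ⟨i, h1, h2, h3⟩; exact ⟨i, h1, by omega, h3⟩
          · rintro ⟨i, h1, h2, h3⟩
            refine ⟨i, h1, ?_, h3⟩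
            by_contra hcon
            have hi : i = r - 25 ∧ 25 ≤ r := by omega
            apply H2' i (by omega)
            rw [List.drop_take, show r + 1 - i = 26 from by omega]
            exact h3
      clear ih
      -- case split on the previous occurrence of cs[r]
      cases hLI : lastIdx cs r cs[r] with
      | none =>
        have hnone := lastIdx_none_spec hLI
        simp only [Option.pure_def, Option.bind_eq_bind, Option.bind_none, Option.map_none]
        apply hfin l hlr
        · rw [hwc l hlr, nodup_concat_iff]
          refine ⟨H1, fun hmem => ?_⟩
          obtain ⟨j, hj1, hj2, hj3⟩ := (mem_win_iff cs l r cs[r]).1 hmem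
          exact hnone j hj2 hj3
        · intro l'' hl''
          rw [hwc l'' (by omega), nodup_concat_iff]
          rintro ⟨hnd, -⟩
          exact H2 l'' hl'' hnd
      | some p =>
        obtain ⟨hp1, hp2, hp3⟩ := lastIdx_some_spec hLI
        simp only [Option.pure_def, Option.bind_eq_bind, Option.bind_some, Option.map_some]
        by_cases hpl : l ≤ p
        · rw [if_pos (show (l:Int) ≤ (p:Int) by omega),
            show (p : Int) + 1 = ((p + 1 : Nat) : Int) from by push_cast; ring]
          apply hfin (p+1) (by omega)
          · rw [hwc (p+1) (by omega), nodup_concat_iff]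
            constructor
            · rw [show p + 1 = l + (p + 1 - l) from by omega, ← List.drop_drop]
              exact List.Nodup.sublist (List.drop_sublist _ _) H1
            · intro hmem
              obtain ⟨j, hj1, hj2, hj3⟩ := (mem_win_iff cs (p+1) r cs[r]).1 hmem
              exact hp3 j (by omega) hj2 hj3
          · intro l'' hl''
            rw [hwc l'' (by omega), nodup_concat_iff]
            rintro ⟨-, hnmem⟩
            exact hnmem ((mem_win_iff cs l'' r cs[r]).2 ⟨p, by omega, hp1, hp2⟩)
        · rw [if_neg (show ¬ (l:Int) ≤ (p:Int) by omega)]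
          apply hfin l hlr
          · rw [hwc l hlr, nodup_concat_iff]
            refine ⟨H1, fun hmem => ?_⟩
            obtain ⟨j, hj1, hj2, hj3⟩ := (mem_win_iff cs l r cs[r]).1 hmem
            rcases Nat.lt_or_ge p j with h' | h'
            · exact hp3 j h' hj2 hj3
            · omega
          · intro l'' hl''
            rw [hwc l'' (by omega), nodup_concat_iff]
            rintro ⟨hnd, -⟩
            exact H2 l'' hl'' hnd

lemma isNiceWord_iff (word : String) : isNiceWord word = true ↔ Good word.toList := by
  unfold isNiceWord
  rw [PySem.Str.len_eq]
  split
  · rename_i h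
    constructor
    · intro hh; cases hh
    · rintro ⟨i, h1, -⟩; omega
  · rename_i h
    rw [loopA_iff word (word.toList.length - 25) 0 ((word.toList.length : Int) - 25)
      (by omega) (by omega)]
    constructor
    · rintro ⟨i, h1, h2, h3⟩; exact ⟨i, by omega, h3⟩
    · rintro ⟨i, h1, h2⟩; exact ⟨i, by omega, by omega, h2⟩

lemma isNiceWord_alt_iff (word : String) : isNiceWord_alt word = true ↔ Good word.toList := by
  unfold isNiceWord_alt
  have := loopB_iff word.toList word.toList.length 0 0 PySem.Dict.empty
    (by omega) (by omega) (by omega)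
    (by simp) (by intro l' h; omega) (by intro c; simp [lastIdx, PySem.Dict.get?_empty])
  norm_num at this
  rw [this]
  exact Iff.rfl

-- ===== VERDICT (by name: the statement is the Claim_ definition above) =====
theorem isNiceWord_spec : Claim_equal_isNiceWord := by
  intro word _
  unfold Spec_isNiceWord
  rw [Bool.eq_iff_iff, isNiceWord_iff, isNiceWord_alt_iff]
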